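-- pv_equiv track=rewrite | github.com/AlexHilson/news_entities | news_entities/articles.py | extract_article_header
-- ===== SOURCE A (Python) =====
-- def extract_article_header(article):
--     '''
--     Given article as a list of lines, classify
--     headline, body, and uncategorised liens
--     '''
--     uncategorised = []
--     body = []
--     headline = None
--     for index, line in enumerate(article):
--         line = line.strip()
--         if line.startswith('BODY:'):
--             body = article[index+1:]
--             break
--         if line.startswith('HEADLINE:'):
--             headline = line.strip()
--         else:
--             uncategorised.append(line.strip())
--     if len(body) == 0:
--         raise ValueError('no body found')
--     return headline, uncategorised, body
-- ===== SOURCE B (Python) =====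
-- def extract_article_header(article):
--     split = next((i for i, line in enumerate(article)
--                   if line.strip().startswith('BODY:')), None)
--     if split is None or split + 1 >= len(article):
--         raise ValueError('no body found')
--     headline = None
--     uncategorised = []
--     for line in article[:split]:
--         s = line.strip()
--         if s.startswith('HEADLINE:'):
--             headline = s
--         else:
--             uncategorised.append(s)
--     return headline, uncategorised, article[split + 1:]
-- ===== Notes on version B (the rewrite author's own statement) =====
-- stated objective: simpler
-- what changed: B first locates the split point (first 'BODY:'-prefixed stripped line) in one search, raises up front if there is no non-empty body, then classifies only the prefix before the split in a second pass, instead of A's single loop that interleaves classification with the break and checks the body afterwards.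
import Mathlib
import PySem

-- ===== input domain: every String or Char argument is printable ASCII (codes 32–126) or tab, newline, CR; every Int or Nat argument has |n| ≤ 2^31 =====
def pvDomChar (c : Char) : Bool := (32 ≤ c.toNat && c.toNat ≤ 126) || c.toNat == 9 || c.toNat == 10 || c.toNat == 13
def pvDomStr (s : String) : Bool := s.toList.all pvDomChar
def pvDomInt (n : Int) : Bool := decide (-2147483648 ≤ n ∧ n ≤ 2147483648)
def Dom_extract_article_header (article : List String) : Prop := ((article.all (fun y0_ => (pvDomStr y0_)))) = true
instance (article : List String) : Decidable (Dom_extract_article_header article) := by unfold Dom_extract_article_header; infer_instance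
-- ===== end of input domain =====

-- B locates the 'BODY:' split point first, then classifies only the prefix in a second pass (simpler decomposition; same cost).


-- ===== PORT A =====
-- A's loop over enumerate(article) with state (headline, uncategorised); on a 'BODY:' line it
-- takes the slice article[index+1:] and breaks.  Where Python raises ValueError (no body found)
-- the port returns the tuple it has built, with body = [].
def extractA_loop (article : List String) (rest : List String) (index : Nat)
    (uncategorised : List String) (headline : Option String) :
    Option String × List String × List String :=
  match rest with
  | [] => (headline, uncategorised, [])
  | line :: rs =>
    let l := PySem.Str.strip line
    if PySem.Str.startswith l "BODY:" then
      (headline, uncategorised, PySem.List.slice article (some (((index : Int)) + 1)) none)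
    else if PySem.Str.startswith l "HEADLINE:" then
      extractA_loop article rs (index + 1) uncategorised (some (PySem.Str.strip l))
    else
      extractA_loop article rs (index + 1) (uncategorised ++ [PySem.Str.strip l]) headline

def extract_article_header (article : List String) : Option String × List String × List String :=
  extractA_loop article article 0 [] none

-- ===== PORT B =====
-- B: find the split index; if absent or last (Python raises ValueError) return body = [];
-- otherwise fold the classifier over the prefix and slice off the body.
def extractB_step (st : Option String × List String) (line : String) : Option String × List String :=
  let s := PySem.Str.strip line
  if PySem.Str.startswith s "HEADLINE:" then (some s, st.2) else (st.1, st.2 ++ [s])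

def extract_article_header_alt (article : List String) : Option String × List String × List String :=
  match List.findIdx? (fun line => PySem.Str.startswith (PySem.Str.strip line) "BODY:") article with
  | none => (none, [], [])
  | some i =>
    if i + 1 ≥ article.length then (none, [], [])
    else
      let st := (List.take i article).foldl extractB_step (none, [])
      (st.1, st.2, List.drop (i + 1) article)

-- ===== PRECONDITION & SPEC =====
-- Pre_ excludes exactly the inputs on which A raises ValueError('no body found'): no stripped
-- line starts with 'BODY:', or the first such line is the last one (empty body slice).
def Pre_extract_article_header (article : List String) : Prop :=
  (match List.findIdx? (fun line => PySem.Str.startswith (PySem.Str.strip line) "BODY:") article with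
   | none => false
   | some i => decide (i + 1 < article.length)) = true
instance (article : List String) : Decidable (Pre_extract_article_header article) := by
  unfold Pre_extract_article_header; infer_instance

def pvWitness_extract_article_header : List String :=
  ["HEADLINE: greetings", " misc line ", "BODY:", "hello world"]

def Spec_extract_article_header (article : List String) (out : Option String × List String × List String) : Prop := out = extract_article_header_alt article
instance (article : List String) (out : Option String × List String × List String) : Decidable (Spec_extract_article_header article out) := by unfold Spec_extract_article_header; infer_instance

-- ===== CLAIM (what is proved, stated in full; the proofs are below) =====
def Claim_equal_extract_article_header : Prop := ∀ (article : List String), Dom_extract_article_header article → Pre_extract_article_header article → Spec_extract_article_header article (extract_article_header article)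

-- ===== LEMMAS AND PROOFS =====

-- Python's str.strip is idempotent (A strips already-stripped lines a second time; B does not).
theorem dropWhile_eq_self_of_prefix {α : Type} (p : α → Bool) {t t' : List α}
    (ht : List.dropWhile p t = t) (h : t' <+: t) : List.dropWhile p t' = t' := by
  rw [List.dropWhile_eq_self_iff] at ht ⊢
  intro hl
  have := h.getElem (i := 0) hl
  rw [this]
  exact ht (lt_of_lt_of_le hl h.length_le)

theorem chars_strip_idem (s : List Char) :
    PySem.Chars.strip (PySem.Chars.strip s) = PySem.Chars.strip s := by
  unfold PySem.Chars.strip PySem.Chars.rstrip PySem.Chars.lstrip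
  set p := PySem.Chars.isspace
  set t := List.dropWhile p s with ht
  have htt : List.dropWhile p t = t := List.dropWhile_idempotent p s
  have hpre : (List.dropWhile p t.reverse).reverse <+: t := by
    have := List.reverse_prefix.mpr (List.dropWhile_suffix (l := t.reverse) p)
    rwa [List.reverse_reverse] at this
  rw [dropWhile_eq_self_of_prefix p htt hpre]
  simp [List.dropWhile_idempotent]

theorem str_strip_idem (s : String) :
    PySem.Str.strip (PySem.Str.strip s) = PySem.Str.strip s := by
  unfold PySem.Str.strip
  simp [chars_strip_idem]

set_option maxHeartbeats 1000000 in
-- A's loop, characterised by the first 'BODY:' index of the remaining lines.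
theorem extractA_loop_found (article : List String) (rest : List String) (index : Nat)
    (uncategorised : List String) (headline : Option String) (j : Nat)
    (hj : List.findIdx? (fun line => PySem.Str.startswith (PySem.Str.strip line) "BODY:") rest = some j) :
    extractA_loop article rest index uncategorised headline =
      (let st := (List.take j rest).foldl extractB_step (headline, uncategorised)
       (st.1, st.2, PySem.List.slice article (some (((index + j : Nat) : Int) + 1)) none)) := by
  induction rest generalizing index uncategorised headline j with
  | nil => simp at hj
  | cons line rs ih =>
    rw [List.findIdx?_cons] at hj
    by_cases hb : PySem.Str.startswith (PySem.Str.strip line) "BODY:" = true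
    · rw [if_pos hb] at hj
      injection hj with hj
      subst hj
      have hb' : PySem.Chars.startswith (PySem.Chars.strip line.toList) ['B','O','D','Y',':'] = true := by
        simpa using hb
      simp [extractA_loop, hb']
    · rw [if_neg hb] at hj
      obtain ⟨j', hj', rfl⟩ := Option.map_eq_some_iff.mp hj
      have harith : index + (j' + 1) = (index + 1) + j' := by omega
      have hb' : PySem.Chars.startswith (PySem.Chars.strip line.toList) ['B','O','D','Y',':'] = false := by
        simpa using hb
      by_cases hh : PySem.Str.startswith (PySem.Str.strip line) "HEADLINE:" = true
      · have hh' : PySem.Chars.startswith (PySem.Chars.strip line.toList) ['H','E','A','D','L','I','N','E',':'] = true := by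
          simpa using hh
        show extractA_loop article (line :: rs) index uncategorised headline = _
        rw [extractA_loop]
        rw [ih (index + 1) uncategorised (some (PySem.Str.strip (PySem.Str.strip line))) j' hj']
        simp [extractB_step, hh', str_strip_idem, harith]
        intro h
        simp [h] at hb'
      · have hh' : PySem.Chars.startswith (PySem.Chars.strip line.toList) ['H','E','A','D','L','I','N','E',':'] = false := by
          simpa using hh
        show extractA_loop article (line :: rs) index uncategorised headline = _
        rw [extractA_loop]
        rw [ih (index + 1) (uncategorised ++ [PySem.Str.strip (PySem.Str.strip line)]) headline j' hj']
        simp [extractB_step, hh', str_strip_idem, harith]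
        intro h
        simp [h] at hb'

-- ===== VERDICT (by name: the statement is the Claim_ definition above) =====
theorem extract_article_header_spec : Claim_equal_extract_article_header := by
  intro article _ hpre
  unfold Pre_extract_article_header at hpre
  unfold Spec_extract_article_header extract_article_header extract_article_header_alt
  cases hfi : List.findIdx? (fun line => PySem.Str.startswith (PySem.Str.strip line) "BODY:") article with
  | none => rw [hfi] at hpre; simp at hpre
  | some i =>
    rw [hfi] at hpre
    simp only [decide_eq_true_eq] at hpre
    rw [extractA_loop_found article article 0 [] none i hfi]
    have : ¬ (i + 1 ≥ article.length) := by omega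
    simp only [this, if_false]
    have hcast : ((0 + i : Nat) : Int) + 1 = (((i + 1 : Nat) : Int)) := by push_cast; ring
    rw [hcast, PySem.List.slice_from_natCast]
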